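-- pv_equiv track=rewrite | github.com/qja1998/SSAFY_algorithm_study | SWEA/모의_역량_테스트/5648_원자_소멸_시뮬레이션/shin.py | new_atom_info
-- ===== SOURCE A (Python) =====
-- def new_atom_info(atom_info):
--     new_energy_info_dict = {}  # 각 좌표 마다 충돌 여부에 따른, energy(value) 값 들어가는 딕셔너리
--     new_dir_info_dict = {}  # 해당 좌표 방향 저장 딕셔너리, 충돌은 상관 없음
--     collision_crds = set()  # 충돌 되는 좌표 모음
--     collision_egy = 0  # 충돌 되고 나온 에너지 합
--
--     for a in atom_info:
--         coord = (a[0], a[1])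
--         dir_info = a[2]
--         power = a[3]
--         # 충돌 했다면, 있는 좌표에 더하기 및 충돌 set에 추가
--         if coord in new_energy_info_dict:
--             new_energy_info_dict[coord] += power
--             collision_crds.add(coord)
--         # 충돌 안했다면, 딕셔너리에 정보 저장
--         else:
--             new_energy_info_dict[coord] = power
--             new_dir_info_dict[coord] = dir_info
--
--     # 새로운 리스트 받기
--     result = []
--     for crd, egy in new_energy_info_dict.items():
--         # 충돌 확인 되면 값이 더해 지도록, 아니면 리스트에 추가
--         if crd in collision_crds:
--             collision_egy += egy
--         else:
--             # 좌표가 범위 내라면, 새 리스트에 추가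
--             if -1000 <= crd[0] <= 1000 and -1000 <= crd[1] <= 1000:
--                 result.append([crd[0], crd[1], new_dir_info_dict[crd], egy])
--
--     return result, collision_egy
-- ===== SOURCE B (Python) =====
-- def new_atom_info(atom_info):
--     # pass 1: count atoms per coordinate; pass 2/3: classify atoms directly
--     counts = {}
--     for a in atom_info:
--         k = (a[0], a[1])
--         counts[k] = counts.get(k, 0) + 1
--     collision_egy = sum(a[3] for a in atom_info if counts[(a[0], a[1])] > 1)
--     result = [[a[0], a[1], a[2], a[3]] for a in atom_info
--               if counts[(a[0], a[1])] == 1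
--               and -1000 <= a[0] <= 1000 and -1000 <= a[1] <= 1000]
--     return result, collision_egy
-- ===== Notes on version B (the rewrite author's own statement) =====
-- stated objective: alternative
-- what changed: B does not aggregate per-coordinate groups at all: it only counts occurrences per coordinate, then computes the collision energy as a flat sum over the original atom rows and builds the result as a flat comprehension over the original atom rows (a unique atom keeps its own direction and power), instead of A's three accumulated structures (energy dict, direction dict, collision set) and its group-wise output loop over dict items.
import Mathlib
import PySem

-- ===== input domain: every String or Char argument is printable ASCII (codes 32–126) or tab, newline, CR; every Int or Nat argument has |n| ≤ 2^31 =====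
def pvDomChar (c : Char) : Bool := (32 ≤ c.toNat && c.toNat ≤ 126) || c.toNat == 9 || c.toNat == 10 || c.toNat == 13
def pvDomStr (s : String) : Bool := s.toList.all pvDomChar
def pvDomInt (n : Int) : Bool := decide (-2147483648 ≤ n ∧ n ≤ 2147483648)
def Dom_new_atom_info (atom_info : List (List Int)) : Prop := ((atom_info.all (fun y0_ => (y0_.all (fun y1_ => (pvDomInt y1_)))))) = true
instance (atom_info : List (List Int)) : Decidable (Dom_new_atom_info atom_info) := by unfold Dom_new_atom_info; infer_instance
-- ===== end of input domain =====

-- B replaces A's per-coordinate aggregation (energy dict, direction dict, collision set, then a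
-- loop over the dict items) by a bare occurrence count per coordinate followed by a flat sum and
-- a flat comprehension over the original atom rows; objective: alternative.

-- shared trivial row accessors: a[0..1] as a pair, a[2], a[3]
def pvCo (a : List Int) : Int × Int := (PySem.List.pyGetD a 0 0, PySem.List.pyGetD a 1 0)
def pvDr (a : List Int) : Int := PySem.List.pyGetD a 2 0
def pvPw (a : List Int) : Int := PySem.List.pyGetD a 3 0

-- ===== PORT A =====
def pvStepA (st : PySem.Dict (Int × Int) Int × PySem.Dict (Int × Int) Int × PySem.Set (Int × Int))
    (a : List Int) :
    PySem.Dict (Int × Int) Int × PySem.Dict (Int × Int) Int × PySem.Set (Int × Int) :=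
  let coord := pvCo a
  let dir_info := pvDr a
  let power := pvPw a
  if st.1.contains coord then
    (st.1.insert coord (st.1.getD coord 0 + power), st.2.1, PySem.Set.add st.2.2 coord)
  else
    (st.1.insert coord power, st.2.1.insert coord dir_info, st.2.2)

-- second loop of A: classify one (coord, energy) item of the energy dict
def pvOutA (dd : PySem.Dict (Int × Int) Int) (s : PySem.Set (Int × Int))
    (acc : List (List Int) × Int) (p : (Int × Int) × Int) : List (List Int) × Int :=
  if PySem.Set.contains s p.1 then (acc.1, acc.2 + p.2)
  else if -1000 ≤ p.1.1 ∧ p.1.1 ≤ 1000 ∧ -1000 ≤ p.1.2 ∧ p.1.2 ≤ 1000 then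
    (acc.1 ++ [[p.1.1, p.1.2, dd.getD p.1 0, p.2]], acc.2)
  else acc

def new_atom_info (atom_info : List (List Int)) : List (List Int) × Int :=
  let st := atom_info.foldl pvStepA (PySem.Dict.empty, PySem.Dict.empty, PySem.Set.empty)
  st.1.items.foldl (pvOutA st.2.1 st.2.2) ([], 0)

-- ===== PORT B =====
def new_atom_info_alt (atom_info : List (List Int)) : List (List Int) × Int :=
  let counts := atom_info.foldl (fun d a => d.modify (pvCo a) (0 : Int) (· + 1)) PySem.Dict.empty
  let collision_egy := atom_info.foldl
    (fun s a => if 1 < counts.getD (pvCo a) 0 then s + pvPw a else s) 0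
  let result := atom_info.foldl
    (fun r a =>
      if counts.getD (pvCo a) 0 = 1 ∧ -1000 ≤ (pvCo a).1 ∧ (pvCo a).1 ≤ 1000 ∧
          -1000 ≤ (pvCo a).2 ∧ (pvCo a).2 ≤ 1000 then
        r ++ [[(pvCo a).1, (pvCo a).2, pvDr a, pvPw a]]
      else r) []
  (result, collision_egy)

-- ===== PRECONDITION & SPEC =====
-- Pre_ excludes exactly the inputs on which the Python A raises IndexError: a row with fewer than
-- 4 elements (A reads a[0]..a[3]).
def Pre_new_atom_info (atom_info : List (List Int)) : Prop :=
  ∀ a ∈ atom_info, 4 ≤ a.length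
instance (atom_info : List (List Int)) : Decidable (Pre_new_atom_info atom_info) := by
  unfold Pre_new_atom_info; infer_instance

def pvWitness_new_atom_info : List (List Int) :=
  [[0, 0, 1, 10], [0, 0, 2, 5], [5, 5, 3, 7], [2000, 0, 1, 1]]

def Spec_new_atom_info (atom_info : List (List Int)) (out : List (List Int) × Int) : Prop := out = new_atom_info_alt atom_info
instance (atom_info : List (List Int)) (out : List (List Int) × Int) : Decidable (Spec_new_atom_info atom_info out) := by unfold Spec_new_atom_info; infer_instance

-- ===== CLAIM (what is proved, stated in full; the proofs are below) =====
def Claim_equal_new_atom_info : Prop := ∀ (atom_info : List (List Int)), Dom_new_atom_info atom_info → Pre_new_atom_info atom_info → Spec_new_atom_info atom_info (new_atom_info atom_info)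

-- ===== LEMMAS AND PROOFS =====

-- spec-level quantities about one coordinate: multiplicity, total power, first direction,
-- first-occurrence key list
def pvCnt (l : List (List Int)) (c : Int × Int) : Nat := l.countP (fun a => pvCo a == c)
def pvTot (l : List (List Int)) (c : Int × Int) : Int :=
  ((l.filter (fun a => pvCo a == c)).map pvPw).sum
def pvFdir (l : List (List Int)) (c : Int × Int) : Int :=
  ((l.filter (fun a => pvCo a == c)).map pvDr).headD 0
def pvK (l : List (List Int)) : List (Int × Int) := PySem.Set.ofList (l.map pvCo)

def pvStA (l : List (List Int)) :
    PySem.Dict (Int × Int) Int × PySem.Dict (Int × Int) Int × PySem.Set (Int × Int) :=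
  l.foldl pvStepA (PySem.Dict.empty, PySem.Dict.empty, PySem.Set.empty)

lemma pvMem_K (l : List (List Int)) (c : Int × Int) : c ∈ pvK l ↔ 1 ≤ pvCnt l c := by
  rw [pvK, PySem.Set.mem_ofList, pvCnt]
  rw [show (1 ≤ l.countP fun a => pvCo a == c) ↔ 0 < l.countP fun a => pvCo a == c from by omega,
    List.countP_pos_iff]
  simp only [List.mem_map, beq_iff_eq]

lemma pvCnt_append (l : List (List Int)) (a : List Int) (c : Int × Int) :
    pvCnt (l ++ [a]) c = pvCnt l c + (if pvCo a = c then 1 else 0) := by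
  simp [pvCnt, List.countP_append, List.countP_cons]

lemma pvTot_append (l : List (List Int)) (a : List Int) (c : Int × Int) :
    pvTot (l ++ [a]) c = pvTot l c + (if pvCo a = c then pvPw a else 0) := by
  by_cases h : pvCo a = c <;> simp [pvTot, List.filter_append, h]

lemma pvFdir_append_of_mem (l : List (List Int)) (a : List Int) (c : Int × Int)
    (h : 1 ≤ pvCnt l c) : pvFdir (l ++ [a]) c = pvFdir l c := by
  have hne : l.filter (fun a => pvCo a == c) ≠ [] := by
    intro hnil
    have := List.countP_eq_length_filter (l := l) (p := fun a => pvCo a == c)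
    rw [pvCnt] at h
    simp [this, hnil] at h
  cases hf : l.filter (fun a => pvCo a == c) with
  | nil => exact absurd hf hne
  | cons x xs => simp [pvFdir, List.filter_append, hf]

lemma pvFdir_append_self (l : List (List Int)) (a : List Int)
    (h : pvCnt l (pvCo a) = 0) : pvFdir (l ++ [a]) (pvCo a) = pvDr a := by
  have hnil : l.filter (fun b => pvCo b == pvCo a) = [] := by
    rw [List.filter_eq_nil_iff]
    intro b hb
    have := List.countP_eq_zero.mp h b hb
    simpa using this
  simp [pvFdir, List.filter_append, hnil]

lemma pvK_nodup (l : List (List Int)) : (pvK l).Nodup := PySem.Set.nodup_ofList _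

lemma pvK_append (l : List (List Int)) (a : List Int) :
    pvK (l ++ [a]) = PySem.Set.add (pvK l) (pvCo a) := by
  rw [pvK, show (l ++ [a]).map pvCo = l.map pvCo ++ [pvCo a] from by simp,
    PySem.Set.ofList_append_singleton, ← pvK]

lemma pvE_keys (l : List (List Int)) (h : (pvStA l).1.items = (pvK l).map (fun c => (c, pvTot l c))) :
    (pvStA l).1.keys = pvK l := by
  simp only [PySem.Dict.keys, h, List.map_map]
  exact List.map_id _

lemma pvE_contains (l : List (List Int)) (h : (pvStA l).1.items = (pvK l).map (fun c => (c, pvTot l c)))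
    (c : Int × Int) : (pvStA l).1.contains c = decide (1 ≤ pvCnt l c) := by
  rw [PySem.Dict.contains_eq_decide_mem_keys, pvE_keys l h]
  simp [pvMem_K]

-- characterisation of the state after A's first loop
lemma pvCharA (l : List (List Int)) :
    (pvStA l).1.items = (pvK l).map (fun c => (c, pvTot l c)) ∧
    (∀ c, 1 ≤ pvCnt l c → (pvStA l).2.1.getD c 0 = pvFdir l c) ∧
    (∀ c, c ∈ (pvStA l).2.2 ↔ 2 ≤ pvCnt l c) := by
  induction l using List.reverseRecOn with
  | nil =>
    refine ⟨rfl, ?_, ?_⟩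
    · intro c hc
      simp [pvCnt] at hc
    · intro c
      simp [pvStA, PySem.Set.empty, pvCnt]
  | append_singleton t a ih =>
    obtain ⟨h1, h2, h3⟩ := ih
    have hstep : pvStA (t ++ [a]) = pvStepA (pvStA t) a := by
      rw [pvStA, List.foldl_append, List.foldl_cons, List.foldl_nil, ← pvStA]
    have hcont := pvE_contains t h1 (pvCo a)
    by_cases hm : 1 ≤ pvCnt t (pvCo a)
    · -- coordinate already seen: overwrite energy, add to collision set
      have hc : (pvStA t).1.contains (pvCo a) = true := by rw [hcont]; simpa using hm
      have hstep' : pvStA (t ++ [a]) =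
          ((pvStA t).1.insert (pvCo a) ((pvStA t).1.getD (pvCo a) 0 + pvPw a),
           (pvStA t).2.1, PySem.Set.add (pvStA t).2.2 (pvCo a)) := by
        rw [hstep, pvStepA]
        simp only [hc, if_true]
      have hKa : pvK (t ++ [a]) = pvK t := by
        rw [pvK_append, PySem.Set.add_of_mem ((pvMem_K t (pvCo a)).mpr hm)]
      have hgd : (pvStA t).1.getD (pvCo a) 0 = pvTot t (pvCo a) := by
        have hmemit : (pvCo a, pvTot t (pvCo a)) ∈ (pvStA t).1.items := by
          rw [h1]
          exact List.mem_map.mpr ⟨pvCo a, (pvMem_K t (pvCo a)).mpr hm, rfl⟩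
        exact PySem.Dict.getD_of_mem_items _ hmemit (by rw [pvE_keys t h1]; exact pvK_nodup t) 0
      refine ⟨?_, ?_, ?_⟩
      · rw [hstep', hKa]
        simp only
        rw [PySem.Dict.items_insert_of_contains _ _ hc, h1, List.map_map]
        refine List.map_congr_left ?_
        intro c hcK
        by_cases hce : c = pvCo a
        · subst hce
          simp [hgd, pvTot_append]
        · have : (c == pvCo a) = false := by simpa using hce
          simp only [Function.comp_apply, this, Bool.false_eq_true, if_false]
          rw [pvTot_append, if_neg (fun he => hce he.symm), add_zero]
      · intro c hc1
        rw [hstep']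
        simp only
        by_cases hce : c = pvCo a
        · subst hce
          rw [h2 _ hm, pvFdir_append_of_mem t a _ hm]
        · have : pvCnt (t ++ [a]) c = pvCnt t c := by
            rw [pvCnt_append, if_neg (fun he => hce he.symm), add_zero]
          rw [this] at hc1
          rw [h2 c hc1, pvFdir_append_of_mem t a c hc1]
      · intro c
        rw [hstep']
        simp only
        rw [PySem.Set.mem_add, h3 c, pvCnt_append]
        by_cases hce : c = pvCo a
        · subst hce
          rw [if_pos rfl]
          constructor
          · intro _; omega
          · intro _; exact Or.inr rfl
        · rw [if_neg (fun he => hce he.symm), add_zero]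
          constructor
          · rintro (h | h)
            · exact h
            · exact absurd h hce
          · exact Or.inl
    · -- fresh coordinate: append to energy dict and direction dict
      have hm0 : pvCnt t (pvCo a) = 0 := by omega
      have hc : (pvStA t).1.contains (pvCo a) = false := by rw [hcont]; simpa using hm
      have hstep' : pvStA (t ++ [a]) =
          ((pvStA t).1.insert (pvCo a) (pvPw a),
           (pvStA t).2.1.insert (pvCo a) (pvDr a), (pvStA t).2.2) := by
        rw [hstep, pvStepA]
        simp only [hc, Bool.false_eq_true, if_false]
      have hKa : pvK (t ++ [a]) = pvK t ++ [pvCo a] := by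
        rw [pvK_append, PySem.Set.add_of_not_mem (fun hmm => hm ((pvMem_K t (pvCo a)).mp hmm))]
      refine ⟨?_, ?_, ?_⟩
      · rw [hstep', hKa]
        simp only
        rw [PySem.Dict.items_insert_of_not_contains _ _ hc, h1, List.map_append]
        congr 1
        · refine List.map_congr_left ?_
          intro c hcK
          have hce : ¬ pvCo a = c := by
            intro he
            exact hm (he ▸ (pvMem_K t c).mp hcK)
          rw [pvTot_append, if_neg hce, add_zero]
        · simp only [List.map_cons, List.map_nil]
          rw [pvTot_append, if_pos rfl]
          have : pvTot t (pvCo a) = 0 := by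
            have hnil : t.filter (fun b => pvCo b == pvCo a) = [] := by
              rw [List.filter_eq_nil_iff]
              intro b hb
              simpa using List.countP_eq_zero.mp hm0 b hb
            simp [pvTot, hnil]
          rw [this, zero_add]
      · intro c hc1
        rw [hstep']
        simp only
        by_cases hce : c = pvCo a
        · subst hce
          rw [PySem.Dict.getD_insert_self, pvFdir_append_self t a hm0]
        · have hcc : pvCnt (t ++ [a]) c = pvCnt t c := by
            rw [pvCnt_append, if_neg (fun he => hce he.symm), add_zero]
          rw [hcc] at hc1
          rw [PySem.Dict.getD_insert_of_ne _ _ _ hce, h2 c hc1, pvFdir_append_of_mem t a c hc1]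
      · intro c
        rw [hstep']
        simp only
        rw [h3 c, pvCnt_append]
        by_cases hce : c = pvCo a
        · subst hce
          rw [if_pos rfl]
          constructor
          · intro h; omega
          · intro h; omega
        · rw [if_neg (fun he => hce he.symm), add_zero]

-- B's count dict holds exactly pvCnt
lemma pvCountsChar (l : List (List Int)) (c : Int × Int) :
    (l.foldl (fun d a => d.modify (pvCo a) (0 : Int) (· + 1)) PySem.Dict.empty).getD c 0
      = (pvCnt l c : Int) := by
  rw [← List.foldl_map (f := pvCo) (g := fun d x => PySem.Dict.modify d x 0 (· + 1))]
  rw [PySem.Dict.getD_foldl_modify_add_one]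
  rw [PySem.Dict.getD_empty]
  rw [List.count_eq_countP, List.countP_map]
  simp [pvCnt]
  rfl

lemma pvUniqueAtom (l : List (List Int)) (a : List Int) (ha : a ∈ l)
    (h1 : pvCnt l (pvCo a) = 1) : l.filter (fun b => pvCo b == pvCo a) = [a] := by
  induction l with
  | nil => cases ha
  | cons x t ih =>
    rw [pvCnt, List.countP_cons] at h1
    by_cases hx : pvCo x = pvCo a
    · have ht0 : t.countP (fun b => pvCo b == pvCo a) = 0 := by
        rw [if_pos (by simpa using hx)] at h1; omega
      have htnil : t.filter (fun b => pvCo b == pvCo a) = [] := by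
        rw [List.filter_eq_nil_iff]; intro b hb; simpa using List.countP_eq_zero.mp ht0 b hb
      have hax : a = x := by
        rcases List.mem_cons.mp ha with h | h
        · exact h
        · exact (List.countP_eq_zero.mp ht0 a h (by simp)).elim
      simp [hx, htnil, hax]
    · have hat : a ∈ t := by
        rcases List.mem_cons.mp ha with h | h
        · exact absurd (congrArg pvCo h.symm) hx
        · exact h
      have hxb : (pvCo x == pvCo a) = false := by simpa using hx
      rw [List.filter_cons, hxb]
      simp only [Bool.false_eq_true, if_false]
      exact ih hat (by rw [pvCnt]; rw [if_neg (by simp [hxb])] at h1; omega)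

lemma pvKeyFilter (l : List (List Int)) (p : Int × Int → Bool)
    (hp : ∀ c, p c = true → pvCnt l c ≤ 1) :
    (pvK l).filter p = (l.filter (fun a => p (pvCo a))).map pvCo := by
  induction l using List.reverseRecOn with
  | nil => simp [pvK]
  | append_singleton t a ih =>
    have hmono : ∀ c, p c = true → pvCnt t c ≤ 1 := by
      intro c hc
      have := hp c hc
      rw [pvCnt_append] at this
      omega
    rw [pvK, show (t ++ [a]).map pvCo = t.map pvCo ++ [pvCo a] from by simp,
      PySem.Set.ofList_append_singleton, ← pvK]
    by_cases hm : pvCo a ∈ pvK t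
    · have h2 : ¬ p (pvCo a) = true := by
        intro hpa
        have := hp _ hpa
        rw [pvCnt_append] at this
        have h1 := (pvMem_K t (pvCo a)).mp hm
        simp at this
        omega
      rw [PySem.Set.add_of_mem hm, List.filter_append, ih hmono]
      simp [h2]
    · rw [PySem.Set.add_of_not_mem hm, List.filter_append, List.filter_append, ih hmono,
        List.map_append]
      by_cases hpa : p (pvCo a) = true <;> simp [hpa]

lemma pvSumIte (a : List Int) (K : List (Int × Int)) (hK : K.Nodup) :
    (K.map (fun c => if pvCo a = c then pvPw a else 0)).sum
      = if pvCo a ∈ K then pvPw a else 0 := by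
  induction K with
  | nil => simp
  | cons c K' ih =>
    rcases List.nodup_cons.mp hK with ⟨hnc, hnd⟩
    by_cases h : pvCo a = c
    · have hnotin : pvCo a ∉ K' := h ▸ hnc
      have hzero : (K'.map (fun c => if pvCo a = c then pvPw a else 0)).sum = 0 := by
        apply List.sum_eq_zero
        intro x hx
        rcases List.mem_map.mp hx with ⟨c', hc', rfl⟩
        rw [if_neg (show ¬(pvCo a = c') from fun he => hnotin (he ▸ hc'))]
      simp only [List.map_cons, List.sum_cons, if_pos h, List.mem_cons, hzero]
      rw [if_pos (Or.inl h), add_zero]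
    · simp only [List.map_cons, List.sum_cons, if_neg h, ih hnd, zero_add, List.mem_cons]
      rw [if_congr (or_iff_right h) rfl rfl]

lemma pvSumKeys (l : List (List Int)) (K : List (Int × Int)) (hK : K.Nodup) :
    (K.map (pvTot l)).sum = ((l.filter (fun a => decide (pvCo a ∈ K))).map pvPw).sum := by
  induction l with
  | nil =>
    have h0 : pvTot ([] : List (List Int)) = fun _ => 0 := funext fun c => by simp [pvTot]
    simp [h0]
  | cons a t ih =>
    have hstep : ∀ c, pvTot (a :: t) c = (if pvCo a = c then pvPw a else 0) + pvTot t c := by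
      intro c
      by_cases h : pvCo a = c <;> simp [pvTot, h]
    calc (K.map (pvTot (a :: t))).sum
        = (K.map (fun c => (if pvCo a = c then pvPw a else 0) + pvTot t c)).sum := by
          rw [List.map_congr_left (fun c _ => hstep c)]
      _ = (K.map (fun c => if pvCo a = c then pvPw a else 0)).sum + (K.map (pvTot t)).sum :=
          PySem.List.sum_map_add_int _ _ _
      _ = ((List.filter (fun a => decide (pvCo a ∈ K)) (a :: t)).map pvPw).sum := by
          rw [pvSumIte a K hK, ih, List.filter_cons]
          by_cases h : pvCo a ∈ K <;> simp [h]

def pvRow (l : List (List Int)) (c : Int × Int) : List Int := [c.1, c.2, pvFdir l c, pvTot l c]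
def pvRowA (a : List Int) : List Int := [(pvCo a).1, (pvCo a).2, pvDr a, pvPw a]
def pvQ (l : List (List Int)) (c : Int × Int) : Bool :=
  !decide (2 ≤ pvCnt l c) &&
    (decide (-1000 ≤ c.1) && decide (c.1 ≤ 1000) && decide (-1000 ≤ c.2) && decide (c.2 ≤ 1000))
def pvCol (l : List (List Int)) (c : Int × Int) : Bool := decide (2 ≤ pvCnt l c)
def pvF1 (l : List (List Int)) (r : List (List Int)) (c : Int × Int) : List (List Int) :=
  if pvQ l c then r ++ [pvRow l c] else r
def pvF2 (l : List (List Int)) (s : Int) (c : Int × Int) : Int :=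
  if pvCol l c then s + pvTot l c else s

lemma pvFoldIfAdd {α : Type} (p : α → Bool) (g : α → Int) (l : List α) (s0 : Int) :
    l.foldl (fun s a => if p a then s + g a else s) s0
      = s0 + ((l.filter p).map g).sum := by
  induction l generalizing s0 with
  | nil => simp
  | cons a t ih => by_cases h : p a <;> simp [h, ih, add_assoc]

lemma pvCnt_pos_of_mem (l : List (List Int)) (a : List Int) (ha : a ∈ l) :
    1 ≤ pvCnt l (pvCo a) := by
  have : 0 < pvCnt l (pvCo a) := List.countP_pos_iff.mpr ⟨a, ha, by simp⟩
  omega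

lemma pvASide (l : List (List Int)) :
    new_atom_info l =
      (((pvK l).filter (pvQ l)).map (pvRow l),
       (((pvK l).filter (pvCol l)).map (pvTot l)).sum) := by
  obtain ⟨h1, h2, h3⟩ := pvCharA l
  show (pvStA l).1.items.foldl (pvOutA (pvStA l).2.1 (pvStA l).2.2) ([], 0) = _
  rw [h1, List.foldl_map]
  have hpt : ∀ (acc : List (List Int) × Int) (c : Int × Int), c ∈ pvK l →
      pvOutA (pvStA l).2.1 (pvStA l).2.2 acc (c, pvTot l c)
        = (pvF1 l acc.1 c, pvF2 l acc.2 c) := by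
    intro acc c hc
    have hgd := h2 c ((pvMem_K l c).mp hc)
    rw [pvOutA, pvF1, pvF2]
    by_cases hcol : 2 ≤ pvCnt l c
    · have hmem : c ∈ (pvStA l).2.2 := (h3 c).mpr hcol
      simp [hmem, pvQ, pvCol, hcol]
    · have hmem : c ∉ (pvStA l).2.2 := fun hm => hcol ((h3 c).mp hm)
      by_cases hr : -1000 ≤ c.1 ∧ c.1 ≤ 1000 ∧ -1000 ≤ c.2 ∧ c.2 ≤ 1000
      · simp [hmem, pvQ, pvCol, hcol, hr.1, hr.2.1, hr.2.2.1, hr.2.2.2, pvRow, hgd]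
      · have hb : (decide (-1000 ≤ c.1) && decide (c.1 ≤ 1000) && decide (-1000 ≤ c.2) &&
            decide (c.2 ≤ 1000)) = false := by
          simpa [Bool.and_eq_true, decide_eq_true_eq, and_assoc] using hr
        simp [hmem, pvQ, pvCol, hcol, hr, hb]
  rw [PySem.List.foldl_congr_mem _ _ _ _ hpt]
  rw [PySem.List.foldl_prod_mk]
  have e1 : List.foldl (pvF1 l) [] (pvK l) = [] ++ ((pvK l).filter (pvQ l)).map (pvRow l) :=
    PySem.List.foldl_append_if (pvQ l) (pvRow l) (pvK l) []
  have e2 : List.foldl (pvF2 l) 0 (pvK l)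
      = 0 + (((pvK l).filter (pvCol l)).map (pvTot l)).sum :=
    pvFoldIfAdd (pvCol l) (pvTot l) (pvK l) 0
  rw [Prod.mk.injEq]
  exact ⟨by simpa using e1, by simpa using e2⟩

lemma pvBSide (l : List (List Int)) :
    new_atom_info_alt l =
      ((l.filter (fun a => pvQ l (pvCo a))).map pvRowA,
       ((l.filter (fun a => pvCol l (pvCo a))).map pvPw).sum) := by
  have hcnt := pvCountsChar l
  simp only [new_atom_info_alt]
  rw [Prod.mk.injEq]
  constructor
  · have hpt : ∀ (r : List (List Int)) (a : List Int), a ∈ l →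
        (if (l.foldl (fun d a => d.modify (pvCo a) (0 : Int) (· + 1)) PySem.Dict.empty).getD (pvCo a) 0 = 1 ∧
            -1000 ≤ (pvCo a).1 ∧ (pvCo a).1 ≤ 1000 ∧ -1000 ≤ (pvCo a).2 ∧ (pvCo a).2 ≤ 1000 then
          r ++ [[(pvCo a).1, (pvCo a).2, pvDr a, pvPw a]]
        else r)
          = (if pvQ l (pvCo a) then r ++ [pvRowA a] else r) := by
      intro r a ha
      have h1c := pvCnt_pos_of_mem l a ha
      have hcond : ((l.foldl (fun d a => d.modify (pvCo a) (0 : Int) (· + 1)) PySem.Dict.empty).getD (pvCo a) 0 = 1 ∧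
            -1000 ≤ (pvCo a).1 ∧ (pvCo a).1 ≤ 1000 ∧ -1000 ≤ (pvCo a).2 ∧ (pvCo a).2 ≤ 1000)
          ↔ pvQ l (pvCo a) = true := by
        rw [hcnt (pvCo a)]
        simp only [pvQ, Bool.and_eq_true, Bool.not_eq_eq_eq_not, Bool.not_true,
          decide_eq_false_iff_not, decide_eq_true_eq]
        omega
      by_cases hc : pvQ l (pvCo a) = true
      · rw [if_pos (hcond.mpr hc), if_pos hc, pvRowA]
      · rw [if_neg (fun hh => hc (hcond.mp hh)), if_neg hc]
    rw [PySem.List.foldl_congr_mem _ _ _ _ hpt,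
      PySem.List.foldl_append_if (fun a => pvQ l (pvCo a)) pvRowA l []]
    simp
  · have hpt2 : ∀ (s : Int) (a : List Int), a ∈ l →
        (if 1 < (l.foldl (fun d a => d.modify (pvCo a) (0 : Int) (· + 1)) PySem.Dict.empty).getD (pvCo a) 0
         then s + pvPw a else s)
          = (if pvCol l (pvCo a) then s + pvPw a else s) := by
      intro s a _
      have hcond : (1 < (l.foldl (fun d a => d.modify (pvCo a) (0 : Int) (· + 1)) PySem.Dict.empty).getD (pvCo a) 0)
          ↔ pvCol l (pvCo a) = true := by
        rw [hcnt (pvCo a)]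
        simp only [pvCol, decide_eq_true_eq]
        omega
      by_cases hc : pvCol l (pvCo a) = true
      · rw [if_pos (hcond.mpr hc), if_pos hc]
      · rw [if_neg (fun hh => hc (hcond.mp hh)), if_neg hc]
    rw [PySem.List.foldl_congr_mem _ _ _ _ hpt2,
      pvFoldIfAdd (fun a => pvCol l (pvCo a)) pvPw l 0]
    simp

lemma pvMain (l : List (List Int)) : new_atom_info l = new_atom_info_alt l := by
  rw [pvASide, pvBSide, Prod.mk.injEq]
  constructor
  · rw [pvKeyFilter l (pvQ l) (fun c hc => by
      simp only [pvQ, Bool.and_eq_true, Bool.not_eq_eq_eq_not, Bool.not_true,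
        decide_eq_false_iff_not] at hc
      omega), List.map_map]
    refine List.map_congr_left ?_
    intro a ha
    rcases List.mem_filter.mp ha with ⟨hal, haq⟩
    have h1 : pvCnt l (pvCo a) = 1 := by
      have := pvCnt_pos_of_mem l a hal
      simp only [pvQ, Bool.and_eq_true, Bool.not_eq_eq_eq_not, Bool.not_true,
        decide_eq_false_iff_not] at haq
      omega
    have hu := pvUniqueAtom l a hal h1
    simp [pvRow, pvRowA, pvFdir, pvTot, hu]
  · rw [pvSumKeys l ((pvK l).filter (pvCol l)) ((pvK_nodup l).filter _)]
    congr 1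
    rw [List.filter_congr (fun a ha => ?_)]
    have hm : pvCo a ∈ pvK l := (pvMem_K l (pvCo a)).mpr (pvCnt_pos_of_mem l a ha)
    simp [List.mem_filter, hm]


-- ===== VERDICT (by name: the statement is the Claim_ definition above) =====
theorem new_atom_info_spec : Claim_equal_new_atom_info := by
  intro atom_info _ _
  unfold Spec_new_atom_info
  exact pvMain atom_info
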